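-- pv_equiv track=rewrite | github.com/csAfter40/Advent_of_Code_2023 | day13/mirrors.py | differs_by_one_item
-- ===== SOURCE A (Python) =====
-- def differs_by_one_item(seq1, seq2):
--     assert len(seq1) == len(seq2)
--     smudge = False
--     for i in range(len(seq1)):
--         if seq1[i] != seq2[i]:
--             if smudge:
--                 return False
--             else:
--                 smudge = True
--     assert smudge
--     return True
-- ===== SOURCE B (Python) =====
-- def differs_by_one_item(seq1, seq2):
--     assert len(seq1) == len(seq2)
--     i = 0
--     while i < len(seq1) and seq1[i] == seq2[i]:
--         i += 1
--     assert i < len(seq1)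
--     return seq1[i+1:] == seq2[i+1:]
-- ===== Notes on version B (the rewrite author's own statement) =====
-- stated objective: alternative
-- what changed: Replaces the running-smudge boolean loop with a two-phase structure: scan to locate the first differing index, then decide the answer by a single bulk comparison of the remaining suffixes.
import Mathlib
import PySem

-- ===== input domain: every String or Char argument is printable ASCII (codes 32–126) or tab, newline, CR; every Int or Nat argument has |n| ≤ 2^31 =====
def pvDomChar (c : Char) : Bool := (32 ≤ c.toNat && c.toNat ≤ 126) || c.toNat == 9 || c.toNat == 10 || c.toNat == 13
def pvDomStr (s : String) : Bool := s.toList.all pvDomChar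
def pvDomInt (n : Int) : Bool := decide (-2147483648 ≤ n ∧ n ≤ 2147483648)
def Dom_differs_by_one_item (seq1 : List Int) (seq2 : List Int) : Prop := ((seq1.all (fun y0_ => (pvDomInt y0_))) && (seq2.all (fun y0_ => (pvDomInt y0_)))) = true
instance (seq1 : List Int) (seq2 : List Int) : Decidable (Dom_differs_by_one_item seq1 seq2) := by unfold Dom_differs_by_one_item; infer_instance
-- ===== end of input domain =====

-- B replaces A's running-smudge boolean loop by locate-first-difference then one bulk suffix comparison; same O(n) cost, different decomposition.


-- ===== PORT A =====
-- the 'for i in range(len(seq1))' loop with the 'smudge' flag; since Pre_ guarantees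
-- equal lengths, indexing both sequences by i is the simultaneous structural recursion.
-- Reaching the end with smudge = false is Python's 'assert smudge' failure (excluded by Pre_).
def pvLoopA : List Int → List Int → Bool → Bool
  | a :: as_, b :: bs, smudge =>
      if a ≠ b then (if smudge then false else pvLoopA as_ bs true)
      else pvLoopA as_ bs smudge
  | _, _, smudge => smudge

def differs_by_one_item (seq1 : List Int) (seq2 : List Int) : Bool :=
  if seq1.length = seq2.length then pvLoopA seq1 seq2 false else false

-- ===== PORT B =====
-- the 'while' loop: advance i while elements are equal
def pvLoopB : List Int → List Int → Nat → Nat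
  | a :: as_, b :: bs, i => if a = b then pvLoopB as_ bs (i + 1) else i
  | _, _, i => i

-- seq[i+1:] with a nonnegative index is exactly List.drop (i+1)
def differs_by_one_item_alt (seq1 : List Int) (seq2 : List Int) : Bool :=
  if seq1.length = seq2.length then
    let i := pvLoopB seq1 seq2 0
    if i < seq1.length then decide (seq1.drop (i + 1) = seq2.drop (i + 1)) else false
  else false

-- ===== PRECONDITION & SPEC =====
-- Pre_ excludes exactly the inputs on which A raises AssertionError: unequal lengths, or identical sequences (no smudge found).
def Pre_differs_by_one_item (seq1 : List Int) (seq2 : List Int) : Prop :=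
  seq1.length = seq2.length ∧ seq1 ≠ seq2
instance (seq1 : List Int) (seq2 : List Int) : Decidable (Pre_differs_by_one_item seq1 seq2) := by unfold Pre_differs_by_one_item; infer_instance

def pvWitness_differs_by_one_item : List Int × List Int := ([1, 2, 3], [1, 5, 3])

def Spec_differs_by_one_item (seq1 : List Int) (seq2 : List Int) (out : Bool) : Prop := out = differs_by_one_item_alt seq1 seq2
instance (seq1 : List Int) (seq2 : List Int) (out : Bool) : Decidable (Spec_differs_by_one_item seq1 seq2 out) := by unfold Spec_differs_by_one_item; infer_instance

-- ===== CLAIM (what is proved, stated in full; the proofs are below) =====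
def Claim_equal_differs_by_one_item : Prop := ∀ (seq1 : List Int) (seq2 : List Int), Dom_differs_by_one_item seq1 seq2 → Pre_differs_by_one_item seq1 seq2 → Spec_differs_by_one_item seq1 seq2 (differs_by_one_item seq1 seq2)

-- ===== LEMMAS AND PROOFS =====

-- once the smudge is set, A's loop just checks the rest is equal
theorem pvLoopA_true (xs ys : List Int) (h : xs.length = ys.length) :
    pvLoopA xs ys true = decide (xs = ys) := by
  induction xs generalizing ys with
  | nil => cases ys with
    | nil => simp [pvLoopA]
    | cons b bs => simp at h
  | cons a as_ ih =>
    cases ys with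
    | nil => simp at h
    | cons b bs =>
      simp at h
      by_cases hab : a = b
      · subst hab
        simp [pvLoopA, ih bs h]
      · simp [pvLoopA, hab]

-- B's index accumulator shifts additively
theorem pvLoopB_shift (xs ys : List Int) (i : Nat) :
    pvLoopB xs ys i = pvLoopB xs ys 0 + i := by
  induction xs generalizing ys i with
  | nil => simp [pvLoopB]
  | cons a as_ ih =>
    cases ys with
    | nil => simp [pvLoopB]
    | cons b bs =>
      by_cases hab : a = b
      · subst hab
        simp only [pvLoopB, if_true]
        rw [ih bs (i + 1), ih bs 1]
        omega
      · simp [pvLoopB, hab]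

-- the two loops agree (equality holds even when both model a raise)
theorem pv_main (xs ys : List Int) (h : xs.length = ys.length) :
    pvLoopA xs ys false =
      (if pvLoopB xs ys 0 < xs.length then
        decide (xs.drop (pvLoopB xs ys 0 + 1) = ys.drop (pvLoopB xs ys 0 + 1))
      else false) := by
  induction xs generalizing ys with
  | nil => cases ys with
    | nil => simp [pvLoopA, pvLoopB]
    | cons b bs => simp at h
  | cons a as_ ih =>
    cases ys with
    | nil => simp at h
    | cons b bs =>
      simp at h
      by_cases hab : a = b
      · subst hab
        have hshift := pvLoopB_shift as_ bs 1
        simp only [pvLoopA, pvLoopB, ite_true, ne_eq, not_true_eq_false,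
          if_false, hshift]
        rw [ih bs h]
        have hiff : pvLoopB as_ bs 0 + 1 < (a :: as_).length ↔ pvLoopB as_ bs 0 < as_.length := by
          simp only [List.length_cons]; omega
        by_cases hlt : pvLoopB as_ bs 0 < as_.length
        · rw [if_pos hlt, if_pos (hiff.mpr hlt)]
          simp [List.drop]
        · rw [if_neg hlt, if_neg (fun hc => hlt (hiff.mp hc))]
      · simp [pvLoopA, pvLoopB, hab, pvLoopA_true as_ bs h, List.drop]

-- ===== VERDICT (by name: the statement is the Claim_ definition above) =====
theorem differs_by_one_item_spec : Claim_equal_differs_by_one_item := by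
  intro seq1 seq2 _ hpre
  unfold Spec_differs_by_one_item differs_by_one_item differs_by_one_item_alt
  rcases hpre with ⟨hlen, _⟩
  simp only [hlen]
  rw [← hlen]
  exact pv_main seq1 seq2 hlen
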